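-- pv_equiv track=rewrite | github.com/AlessioDiaz0/Translated_Project | solution/services/stammering_service.py | _count_max_consecutive
-- ===== SOURCE A (Python) =====
-- from typing import List, Tuple
--
-- def _count_max_consecutive(ngrams: List[Tuple[str, ...]], target: Tuple[str, ...]) -> int:
--     """Count maximum consecutive occurrences of an ngram."""
--     max_count = 0
--     current_count = 0
--
--     for ngram in ngrams:
--         if ngram == target:
--             current_count += 1
--             max_count = max(max_count, current_count)
--         else:
--             current_count = 0
--
--     return max_count
-- ===== SOURCE B (Python) =====
-- from itertools import groupby
--
-- def _count_max_consecutive(ngrams, target):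
--     """Count maximum consecutive occurrences of an ngram."""
--     return max(
--         (sum(1 for _ in grp)
--          for key, grp in groupby(ngrams, key=lambda n: n == target)
--          if key),
--         default=0,
--     )
-- ===== Notes on version B (the rewrite author's own statement) =====
-- stated objective: idiomatic
-- what changed: B groups the list into maximal runs with itertools.groupby keyed by equality with the target and takes max(run lengths, default=0), replacing A's running-counter loop with explicit branches.
import Mathlib
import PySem

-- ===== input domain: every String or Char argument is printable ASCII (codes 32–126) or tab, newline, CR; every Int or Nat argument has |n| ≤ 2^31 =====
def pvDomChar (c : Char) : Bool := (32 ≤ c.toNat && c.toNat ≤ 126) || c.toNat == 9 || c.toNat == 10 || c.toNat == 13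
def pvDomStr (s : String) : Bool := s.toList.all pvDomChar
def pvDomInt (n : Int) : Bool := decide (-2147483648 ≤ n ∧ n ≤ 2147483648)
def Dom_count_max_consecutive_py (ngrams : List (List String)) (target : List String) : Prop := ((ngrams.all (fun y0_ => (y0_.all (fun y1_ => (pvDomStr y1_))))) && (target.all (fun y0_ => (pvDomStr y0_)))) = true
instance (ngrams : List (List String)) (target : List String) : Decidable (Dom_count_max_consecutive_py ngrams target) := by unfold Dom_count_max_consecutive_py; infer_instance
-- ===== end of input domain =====

-- B groups the list into maximal runs keyed by equality with the target and takes
-- max(run lengths, default=0) instead of A's running-counter loop (idiomatic; same cost).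

-- ===== PORT A =====
-- A: running counter, reset on mismatch, max tracked alongside.
def count_max_consecutive_py (ngrams : List (List String)) (target : List String) : Int :=
  (ngrams.foldl
    (fun (st : Int × Int) ngram =>
      if ngram == target then (max st.1 (st.2 + 1), st.2 + 1) else (st.1, 0))
    (0, 0)).1

-- ===== PORT B =====
-- itertools.groupby: maximal runs of elements with the same key (here: == target),
-- each reduced to (key, length of the run), in order.
def pyGroupLens (target : List String) : List (List String) → List (Bool × Int)
  | [] => []
  | x :: xs =>
    let k := x == target
    let run := xs.takeWhile (fun y => (y == target) == k)
    let rest := xs.dropWhile (fun y => (y == target) == k)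
    (k, 1 + (run.length : Int)) :: pyGroupLens target rest
termination_by l => l.length
decreasing_by
  simpa using Nat.lt_succ_of_le (List.length_dropWhile_le _ _)

-- max(lengths of the key=True groups, default=0)
def count_max_consecutive_py_alt (ngrams : List (List String)) (target : List String) : Int :=
  (pyGroupLens target ngrams).foldl (fun m kc => if kc.1 then max m kc.2 else m) 0

-- ===== PRECONDITION & SPEC =====
def Spec_count_max_consecutive_py (ngrams : List (List String)) (target : List String) (out : Int) : Prop := out = count_max_consecutive_py_alt ngrams target
instance (ngrams : List (List String)) (target : List String) (out : Int) : Decidable (Spec_count_max_consecutive_py ngrams target out) := by unfold Spec_count_max_consecutive_py; infer_instance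

-- ===== CLAIM (what is proved, stated in full; the proofs are below) =====
def Claim_equal_count_max_consecutive_py : Prop := ∀ (ngrams : List (List String)) (target : List String), Dom_count_max_consecutive_py ngrams target → Spec_count_max_consecutive_py ngrams target (count_max_consecutive_py ngrams target)

-- ===== LEMMAS AND PROOFS =====

-- Reference function: gAux t c l = the maximum run length of t in l, where a run of
-- length c is already pending at the front.
def gAux (t : List String) (c : Int) : List (List String) → Int
  | [] => c
  | x :: xs => if x == t then gAux t (c + 1) xs else max c (gAux t 0 xs)

theorem le_gAux (t : List String) (l : List (List String)) :
    ∀ c : Int, c ≤ gAux t c l := by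
  induction l with
  | nil => intro c; simp [gAux]
  | cons x xs ih =>
    intro c
    simp only [gAux]
    split
    · exact le_trans (by omega) (ih (c + 1))
    · exact le_max_left _ _

-- A's loop computes max m (gAux t c l) whenever 0 ≤ c ≤ m.
theorem loopA_eq (t : List String) (l : List (List String)) :
    ∀ m c : Int, 0 ≤ c → c ≤ m →
      (l.foldl (fun (st : Int × Int) ngram =>
        if ngram == t then (max st.1 (st.2 + 1), st.2 + 1) else (st.1, 0)) (m, c)).1
      = max m (gAux t c l) := by
  induction l with
  | nil => intro m c h0 h; simp [gAux]; omega
  | cons x xs ih =>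
    intro m c h0 h
    simp only [List.foldl_cons, gAux]
    by_cases hx : (x == t) = true
    · simp only [hx, if_pos]
      rw [ih (max m (c + 1)) (c + 1) (by omega) (le_max_right _ _)]
      have h1 := le_gAux t xs (c + 1)
      omega
    · rw [if_neg hx, if_neg hx]
      rw [ih m 0 le_rfl (by omega)]
      have h1 := le_gAux t xs 0
      omega

-- Traversing a run of matches adds its length to the pending counter.
theorem gAux_run (t : List String) (run : List (List String))
    (hall : ∀ y ∈ run, (y == t) = true) :
    ∀ (c : Int) (rest : List (List String)),
      gAux t c (run ++ rest) = gAux t (c + run.length) rest := by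
  induction run with
  | nil => intro c rest; simp
  | cons y ys ih =>
    intro c rest
    have hy : (y == t) = true := hall y (by simp)
    simp only [List.cons_append, gAux, hy, if_pos]
    rw [ih (fun z hz => hall z (by simp [hz])) (c + 1) rest]
    congr 1
    simp only [List.length_cons]
    push_cast
    ring

-- Traversing a run of non-matches just folds max c over the reset counter.
theorem gAux_nonrun (t : List String) (run : List (List String))
    (hall : ∀ y ∈ run, (y == t) = false) :
    ∀ rest : List (List String),
      gAux t 0 (run ++ rest) = max 0 (gAux t 0 rest) := by
  induction run with
  | nil =>
    intro rest
    have := le_gAux t rest 0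
    simp only [List.nil_append]
    omega
  | cons y ys ih =>
    intro rest
    have hy : (y == t) = false := hall y (by simp)
    simp only [List.cons_append, gAux]
    rw [if_neg (by simp [hy])]
    rw [ih (fun z hz => hall z (by simp [hz])) rest]
    omega

-- If the head of rest does not match (or rest is empty), a pending counter c ≥ 0 commutes out.
theorem gAux_break (t : List String) (rest : List (List String))
    (hrest : rest = [] ∨ ∃ y ys, rest = y :: ys ∧ (y == t) = false)
    (c : Int) (hc : 0 ≤ c) :
    gAux t c rest = max c (gAux t 0 rest) := by
  rcases hrest with h | ⟨y, ys, rfl, hy⟩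
  · subst h
    show c = max c (gAux t 0 [])
    simp only [gAux]
    exact (max_eq_left hc).symm
  · simp only [gAux]
    rw [if_neg (by simp [hy]), if_neg (by simp [hy])]
    rw [max_eq_right (le_gAux t ys 0)]

-- B's fold over the groups computes max acc (gAux t 0 l) for acc ≥ 0
-- (strong induction on the length, following pyGroupLens's recursion).
theorem foldB_eq_aux (t : List String) :
    ∀ (n : Nat) (l : List (List String)), l.length ≤ n →
      ∀ acc : Int, 0 ≤ acc →
        (pyGroupLens t l).foldl (fun m kc => if kc.1 then max m kc.2 else m) acc
        = max acc (gAux t 0 l) := by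
  intro n
  induction n with
  | zero =>
    intro l hl acc hacc
    have : l = [] := List.length_eq_zero_iff.mp (Nat.le_zero.mp hl)
    subst this
    simp [pyGroupLens, gAux]; omega
  | succ n ih =>
    intro l hl acc hacc
    cases l with
    | nil => simp [pyGroupLens, gAux]; omega
    | cons x xs =>
      set k := (x == t) with hkdef
      set run := xs.takeWhile (fun y => (y == t) == k) with hrun
      set rest := xs.dropWhile (fun y => (y == t) == k) with hrest
      have hdecomp : xs = run ++ rest := (List.takeWhile_append_dropWhile).symm
      have hlen : rest.length ≤ n := by
        have h1 : rest.length ≤ xs.length := by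
          rw [hrest]; exact List.length_dropWhile_le _ xs
        simp only [List.length_cons] at hl
        omega
      have hunf : pyGroupLens t (x :: xs)
          = (k, 1 + (run.length : Int)) :: pyGroupLens t rest := by
        rw [pyGroupLens]
      rw [hunf, List.foldl_cons]
      by_cases hk : (x == t) = true
      · have hall : ∀ y ∈ run, (y == t) = true := by
          intro y hy
          have := List.mem_takeWhile_imp (l := xs) (hrun ▸ hy)
          simpa [hkdef, hk] using this
        have hrestbr : rest = [] ∨ ∃ y ys, rest = y :: ys ∧ (y == t) = false := by
          cases hr : rest with
          | nil => exact Or.inl rfl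
          | cons y ys =>
            refine Or.inr ⟨y, ys, rfl, ?_⟩
            have hhd := List.head?_dropWhile_not (p := fun y => (y == t) == k) xs
            rw [← hrest, hr] at hhd
            simp only [List.head?_cons] at hhd
            simpa [hkdef, hk] using hhd
        have hg : gAux t 0 (x :: xs) = max (1 + (run.length : Int)) (gAux t 0 rest) := by
          conv_lhs => rw [show (x :: xs) = x :: (run ++ rest) from by rw [← hdecomp]]
          simp only [gAux, hk, if_pos]
          rw [gAux_run t run hall (0 + 1) rest,
              gAux_break t rest hrestbr ((0 + 1) + run.length) (by positivity)]
          norm_num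
        simp only [hkdef, hk, if_pos]
        rw [ih rest hlen (max acc (1 + (run.length : Int))) (by positivity), hg]
        omega
      · have hall : ∀ y ∈ run, (y == t) = false := by
          intro y hy
          have := List.mem_takeWhile_imp (l := xs) (hrun ▸ hy)
          simpa [hkdef, hk] using this
        have hg : gAux t 0 (x :: xs) = max 0 (gAux t 0 rest) := by
          conv_lhs => rw [show (x :: xs) = x :: (run ++ rest) from by rw [← hdecomp]]
          simp only [gAux]
          rw [if_neg (by simp [hk])]
          rw [gAux_nonrun t run hall rest]
          rw [max_eq_right (le_gAux t rest 0), max_eq_right (le_gAux t rest 0)]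
        rw [if_neg (by simp [hkdef, hk])]
        rw [ih rest hlen acc hacc, hg]
        have := le_gAux t rest 0
        omega

-- ===== VERDICT (by name: the statement is the Claim_ definition above) =====
theorem count_max_consecutive_py_spec : Claim_equal_count_max_consecutive_py := by
  intro ngrams target _
  unfold Spec_count_max_consecutive_py count_max_consecutive_py count_max_consecutive_py_alt
  rw [loopA_eq target ngrams 0 0 le_rfl le_rfl,
      foldB_eq_aux target ngrams.length ngrams le_rfl 0 le_rfl]
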